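-- pv_equiv track=rewrite | github.com/zhouhangtju/ppt-master-cm | skills/ppt-master/scripts/notes_to_audio.py | spoken_text
-- ===== SOURCE A (Python) =====
-- def spoken_text(markdown: str) -> str:
--     """Return narration text exactly from notes, except Markdown headings."""
--     lines: list[str] = []
--     for raw in markdown.splitlines():
--         if raw.lstrip().startswith("#"):
--             continue
--         line = raw.rstrip()
--         if not line.strip():
--             if lines and lines[-1] != "":
--                 lines.append("")
--             continue
--         lines.append(line)
--     return "\n".join(lines).strip()
-- ===== SOURCE B (Python) =====
-- def spoken_text(markdown: str) -> str:
--     """Return narration text exactly from notes, except Markdown headings."""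
--     kept = [line.rstrip() for line in markdown.splitlines()
--             if not line.lstrip().startswith("#")]
--     paragraphs: list[str] = []
--     current: list[str] = []
--     for line in kept:
--         if line:
--             current.append(line)
--         elif current:
--             paragraphs.append("\n".join(current))
--             current = []
--     if current:
--         paragraphs.append("\n".join(current))
--     return "\n\n".join(paragraphs).strip()
-- ===== Notes on version B (the rewrite author's own statement) =====
-- stated objective: simpler
-- what changed: A maintains a lines list with previous-line state, injecting empty sentinel lines to collapse blank runs and stripping the join afterwards; B filters and rstrips the kept lines in one comprehension, groups them into paragraphs, and joins the paragraphs with a blank-line separator.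
import Mathlib
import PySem

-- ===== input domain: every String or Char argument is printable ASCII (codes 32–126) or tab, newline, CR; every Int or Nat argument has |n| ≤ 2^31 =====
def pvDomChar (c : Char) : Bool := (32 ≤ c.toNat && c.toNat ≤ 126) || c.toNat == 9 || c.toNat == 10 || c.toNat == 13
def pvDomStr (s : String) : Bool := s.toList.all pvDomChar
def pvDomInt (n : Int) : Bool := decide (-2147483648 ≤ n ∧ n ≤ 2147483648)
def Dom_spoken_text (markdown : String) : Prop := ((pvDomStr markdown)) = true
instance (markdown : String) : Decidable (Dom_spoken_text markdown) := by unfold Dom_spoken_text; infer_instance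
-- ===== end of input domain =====

-- B replaces A's prev-line/sentinel state machine by grouping kept lines into paragraphs
-- joined with "\n\n" (objective: simpler decomposition, same cost).

-- ===== PORT A =====
def spoken_text (markdown : String) : String :=
  let lines : List String :=
    (PySem.Str.splitlines markdown).foldl
      (fun lines raw =>
        if PySem.Str.startswith (PySem.Str.lstrip raw) "#" then lines
        else
          let line := PySem.Str.rstrip raw
          if PySem.Str.strip line = "" then
            if lines ≠ [] ∧ lines.getLast? ≠ some "" then lines ++ [""] else lines
          else lines ++ [line])
      []
  PySem.Str.strip (PySem.Str.join "\n" lines)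

-- ===== PORT B =====
def spoken_text_alt (markdown : String) : String :=
  let kept : List String :=
    ((PySem.Str.splitlines markdown).filter
        (fun l => ! PySem.Str.startswith (PySem.Str.lstrip l) "#")).map PySem.Str.rstrip
  let st : List String × List String :=
    kept.foldl
      (fun (pc : List String × List String) line =>
        if line ≠ "" then (pc.1, pc.2 ++ [line])
        else if pc.2 ≠ [] then (pc.1 ++ [PySem.Str.join "\n" pc.2], [])
        else pc)
      ([], [])
  let paragraphs : List String :=
    if st.2 ≠ [] then st.1 ++ [PySem.Str.join "\n" st.2] else st.1
  PySem.Str.strip (PySem.Str.join "\n\n" paragraphs)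

-- ===== PRECONDITION & SPEC =====
def Spec_spoken_text (markdown : String) (out : String) : Prop := out = spoken_text_alt markdown
instance (markdown : String) (out : String) : Decidable (Spec_spoken_text markdown out) := by unfold Spec_spoken_text; infer_instance

-- ===== CLAIM (what is proved, stated in full; the proofs are below) =====
def Claim_equal_spoken_text : Prop := ∀ (markdown : String), Dom_spoken_text markdown → Spec_spoken_text markdown (spoken_text markdown)

-- ===== LEMMAS AND PROOFS =====

-- A's loop step and B's loop step, named for the proofs.
def pvStepA (lines : List String) (raw : String) : List String :=
  if PySem.Str.startswith (PySem.Str.lstrip raw) "#" then lines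
  else
    let line := PySem.Str.rstrip raw
    if PySem.Str.strip line = "" then
      if lines ≠ [] ∧ lines.getLast? ≠ some "" then lines ++ [""] else lines
    else lines ++ [line]

def pvStepB (pc : List String × List String) (line : String) : List String × List String :=
  if line ≠ "" then (pc.1, pc.2 ++ [line])
  else if pc.2 ≠ [] then (pc.1 ++ [PySem.Str.join "\n" pc.2], [])
  else pc

-- B's step with A's filter/map fused in (what B's foldl over `kept` unfolds to).
def pvStepB' (pc : List String × List String) (raw : String) : List String × List String :=
  if (! PySem.Str.startswith (PySem.Str.lstrip raw) "#") = true
  then pvStepB pc (PySem.Str.rstrip raw) else pc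

-- string helper lemmas ---------------------------------------------------

theorem pv_join_singleton (sep x : String) : PySem.Str.join sep [x] = x := by
  simp [PySem.Str.join, PySem.Chars.join, List.intercalate, String.ofList_toList]

theorem pv_join_append_last (sep : String) (P : List String) (y : String) (hP : P ≠ []) :
    PySem.Str.join sep (P ++ [y]) = PySem.Str.join sep P ++ sep ++ y := by
  simp only [PySem.Str.join, PySem.Chars.join]
  apply String.toList_injective
  simp only [String.toList_append, String.toList_ofList]
  induction P with
  | nil => exact absurd rfl hP
  | cons a t ih =>
    cases t with
    | nil => simp [List.intercalate]
    | cons b t' =>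
      have h1 : sep.toList.intercalate (List.map String.toList ((a :: b :: t') ++ [y]))
          = a.toList ++ sep.toList ++ sep.toList.intercalate (List.map String.toList ((b :: t') ++ [y])) := by
        simp [List.intercalate]
      have h2 : sep.toList.intercalate (List.map String.toList (a :: b :: t'))
          = a.toList ++ sep.toList ++ sep.toList.intercalate (List.map String.toList (b :: t')) := by
        simp [List.intercalate]
      rw [h1, h2, ih (by simp)]
      simp

theorem pv_append_empty (x : String) : x ++ "" = x := by
  apply String.toList_injective; simp

theorem pv_nn : ("\n\n" : String) = "\n" ++ "\n" := by decide

-- strip / rstrip facts ---------------------------------------------------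

theorem pv_dropWhile_idem (p : Char → Bool) (l : List Char) :
    (l.dropWhile p).dropWhile p = l.dropWhile p := by
  induction l with
  | nil => rfl
  | cons a t ih =>
    by_cases h : p a
    · simp [h, ih]
    · simp [h]

-- For y already rstripped, "not y.strip()" (A's blank test) is the same as "not y" (B's).
theorem pv_strip_rstrip_eq_empty_iff (raw : String) :
    (PySem.Str.strip (PySem.Str.rstrip raw) = "") ↔ (PySem.Str.rstrip raw = "") := by
  constructor
  · intro h
    have h' : PySem.Chars.rstrip (PySem.Chars.lstrip (PySem.Chars.rstrip raw.toList)) = [] := by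
      have := congrArg String.toList h
      simpa [PySem.Str.strip, PySem.Str.rstrip, PySem.Chars.strip] using this
    -- all chars of lstrip (rstrip raw) are whitespace
    have hws : ∀ c ∈ PySem.Chars.lstrip (PySem.Chars.rstrip raw.toList), PySem.Chars.isspace c = true := by
      intro c hc
      have : (PySem.Chars.lstrip (PySem.Chars.rstrip raw.toList)).reverse.dropWhile PySem.Chars.isspace = [] := by
        simpa [PySem.Chars.rstrip, List.reverse_eq_nil_iff] using h'
      have := List.dropWhile_eq_nil_iff.mp this c (by simpa using hc)
      exact this
    -- hence every char of rstrip raw is whitespace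
    have hall : ∀ c ∈ PySem.Chars.rstrip raw.toList, PySem.Chars.isspace c = true := by
      intro c hc
      have hsplit : List.takeWhile PySem.Chars.isspace (PySem.Chars.rstrip raw.toList)
          ++ PySem.Chars.lstrip (PySem.Chars.rstrip raw.toList) = PySem.Chars.rstrip raw.toList := by
        simpa [PySem.Chars.lstrip] using
          (List.takeWhile_append_dropWhile (p := PySem.Chars.isspace) (l := PySem.Chars.rstrip raw.toList))
      rw [← hsplit] at hc
      rcases List.mem_append.mp hc with h1 | h2
      · exact List.mem_takeWhile_imp h1
      · exact hws c h2
    -- so rstrip (rstrip raw) = [], and rstrip is idempotent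
    have hnil : PySem.Chars.rstrip (PySem.Chars.rstrip raw.toList) = [] := by
      simp only [PySem.Chars.rstrip, List.reverse_eq_nil_iff]
      exact List.dropWhile_eq_nil_iff.mpr (fun c hc => hall c (by
        simpa [PySem.Chars.rstrip] using hc))
    have hidem : PySem.Chars.rstrip (PySem.Chars.rstrip raw.toList) = PySem.Chars.rstrip raw.toList := by
      simp [PySem.Chars.rstrip, pv_dropWhile_idem]
    rw [hidem] at hnil
    apply String.toList_injective
    simp [PySem.Str.rstrip, hnil]
  · intro h; rw [h]; rfl

theorem pv_strip_append_newline (x : String) :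
    PySem.Str.strip (x ++ "\n") = PySem.Str.strip x := by
  apply String.toList_injective
  simp only [PySem.Str.strip, String.toList_ofList, String.toList_append, PySem.Chars.strip]
  have hnl : PySem.Chars.isspace '\n' = true := by decide
  have hcl : ("\n" : String).toList = ['\n'] := by decide
  rw [hcl]
  by_cases hall : (PySem.Chars.lstrip x.toList).isEmpty
  · -- x is all whitespace
    have hx : PySem.Chars.lstrip x.toList = [] := by simpa [List.isEmpty_iff] using hall
    have h2 : PySem.Chars.lstrip (x.toList ++ ['\n']) = [] := by
      simp only [PySem.Chars.lstrip] at hx ⊢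
      rw [List.dropWhile_append, hx]
      simp [hnl]
    rw [h2, hx]
  · have hx : PySem.Chars.lstrip (x.toList ++ ['\n'])
        = PySem.Chars.lstrip x.toList ++ ['\n'] := by
      simp only [PySem.Chars.lstrip] at hall ⊢
      rw [List.dropWhile_append]
      simp [hall]
    rw [hx]
    simp [PySem.Chars.rstrip, hnl]

-- the loop invariant -----------------------------------------------------

def pvInv (L P C : List String) : Prop :=
  (C ≠ [] →
      PySem.Str.join "\n" L = PySem.Str.join "\n\n" (P ++ [PySem.Str.join "\n" C])
        ∧ L ≠ [] ∧ L.getLast? ≠ some "") ∧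
  (C = [] → P = [] → L = []) ∧
  (C = [] → P ≠ [] →
      PySem.Str.join "\n" L = PySem.Str.join "\n\n" P ++ "\n" ∧ L.getLast? = some "")

theorem pv_join2_push (P : List String) (C : List String) (x : String) (hC : C ≠ []) :
    PySem.Str.join "\n\n" (P ++ [PySem.Str.join "\n" (C ++ [x])])
      = PySem.Str.join "\n\n" (P ++ [PySem.Str.join "\n" C]) ++ "\n" ++ x := by
  rw [pv_join_append_last "\n" C x hC]
  cases P with
  | nil =>
    simp only [List.nil_append, pv_join_singleton]
  | cons a t =>
    rw [pv_join_append_last "\n\n" (a :: t) _ (by simp),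
        pv_join_append_last "\n\n" (a :: t) _ (by simp)]
    apply String.toList_injective; simp

theorem pv_inv_step (L : List String) (P C : List String) (raw : String)
    (h : pvInv L P C) : pvInv (pvStepA L raw) (pvStepB' (P, C) raw).1 (pvStepB' (P, C) raw).2 := by
  obtain ⟨h1, h2, h3⟩ := h
  unfold pvStepA pvStepB'
  by_cases hh : PySem.Str.startswith (PySem.Str.lstrip raw) "#" = true
  · rw [if_pos hh, if_neg (show ¬ ((!PySem.Str.startswith (PySem.Str.lstrip raw) "#") = true) by
      rw [hh]; decide)]
    exact show pvInv L P C from ⟨h1, h2, h3⟩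
  · have hf : PySem.Str.startswith (PySem.Str.lstrip raw) "#" = false := by
      revert hh; cases PySem.Str.startswith (PySem.Str.lstrip raw) "#" <;> simp
    rw [if_neg hh, if_pos (show (!PySem.Str.startswith (PySem.Str.lstrip raw) "#") = true by
      rw [hf]; decide)]
    unfold pvStepB
    set x := PySem.Str.rstrip raw with hx
    by_cases hb : PySem.Str.strip x = ""
    · -- blank line
      have hxe : x = "" := (pv_strip_rstrip_eq_empty_iff raw).mp hb
      rw [if_pos hb, if_neg (show ¬ x ≠ "" by simp [hxe])]
      by_cases hC : C = []
      · -- B skips; A must skip too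
        rw [if_neg (show ¬ (P, C).2 ≠ [] by simp [hC])]
        by_cases hP : P = []
        · have hL : L = [] := h2 hC hP
          rw [if_neg (fun hc => hc.1 hL)]
          exact show pvInv L P C from ⟨h1, h2, h3⟩
        · obtain ⟨_, hlast⟩ := h3 hC hP
          rw [if_neg (fun hc => hc.2 hlast)]
          exact show pvInv L P C from ⟨h1, h2, h3⟩
      · -- close the paragraph
        obtain ⟨heq, hLne, hlast⟩ := h1 hC
        rw [if_pos (show (P, C).2 ≠ [] from hC), if_pos ⟨hLne, hlast⟩]
        refine show pvInv (L ++ [""]) (P ++ [PySem.Str.join "\n" C]) [] from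
          ⟨fun hc => absurd rfl hc, fun _ hP' => absurd hP' (by simp), fun _ _ => ⟨?_, ?_⟩⟩
        · rw [pv_join_append_last "\n" L "" hLne, heq, pv_append_empty]
        · exact List.getLast?_concat
    · -- content line
      have hxne : x ≠ "" := by
        intro hxe; apply hb; rw [hxe]; rfl
      rw [if_neg hb, if_pos hxne]
      refine show pvInv (L ++ [x]) P (C ++ [x]) from
        ⟨fun _ => ⟨?_, by simp, by rw [List.getLast?_concat]; simpa using hxne⟩,
         fun hc => absurd hc (by simp), fun hc => absurd hc (by simp)⟩
      by_cases hC : C = []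
      · subst hC
        by_cases hP : P = []
        · have hL : L = [] := h2 rfl hP
          subst hL hP
          simp [pv_join_singleton]
        · obtain ⟨heq, hlast⟩ := h3 rfl hP
          have hLne : L ≠ [] := by
            intro hL; rw [hL] at hlast; simp at hlast
          rw [pv_join_append_last "\n" L x hLne, heq, List.nil_append,
              pv_join_append_last "\n\n" P _ hP, pv_join_singleton, pv_nn]
          apply String.toList_injective; simp
      · obtain ⟨heq, hLne, _⟩ := h1 hC
        rw [pv_join_append_last "\n" L x hLne, heq, pv_join2_push P C x hC]

theorem pv_inv_fold (raws : List String) (L P C : List String) (h : pvInv L P C) :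
    pvInv (raws.foldl pvStepA L) (raws.foldl pvStepB' (P, C)).1 (raws.foldl pvStepB' (P, C)).2 := by
  induction raws generalizing L P C with
  | nil => exact h
  | cons r t ih =>
    simp only [List.foldl_cons]
    have := pv_inv_step L P C r h
    have hpair : (pvStepB' (P, C) r) = ((pvStepB' (P, C) r).1, (pvStepB' (P, C) r).2) := rfl
    rw [hpair]
    exact ih _ _ _ this

-- ===== VERDICT (by name: the statement is the Claim_ definition above) =====
theorem spoken_text_spec : Claim_equal_spoken_text := by
  intro markdown _
  unfold Spec_spoken_text spoken_text spoken_text_alt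
  simp only [List.foldl_filter, List.foldl_map]
  set raws := PySem.Str.splitlines markdown with hraws
  have hA : raws.foldl
      (fun lines raw =>
        if PySem.Str.startswith (PySem.Str.lstrip raw) "#" then lines
        else
          if PySem.Str.strip (PySem.Str.rstrip raw) = "" then
            if lines ≠ [] ∧ lines.getLast? ≠ some "" then lines ++ [""] else lines
          else lines ++ [PySem.Str.rstrip raw]) [] = raws.foldl pvStepA [] := rfl
  have hB : raws.foldl
      (fun (x : List String × List String) y =>
        if (!PySem.Str.startswith (PySem.Str.lstrip y) "#") = true then
          if PySem.Str.rstrip y ≠ "" then (x.1, x.2 ++ [PySem.Str.rstrip y])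
          else if x.2 ≠ [] then (x.1 ++ [PySem.Str.join "\n" x.2], []) else x
        else x) ([], []) = raws.foldl pvStepB' ([], []) := rfl
  rw [hA, hB]
  have hinv : pvInv (raws.foldl pvStepA []) (raws.foldl pvStepB' ([], [])).1
      (raws.foldl pvStepB' ([], [])).2 := by
    apply pv_inv_fold
    exact ⟨fun h => absurd rfl h, fun _ _ => rfl, fun _ h => absurd rfl h⟩
  set L := raws.foldl pvStepA [] with hL
  set P := (raws.foldl pvStepB' ([], [])).1 with hP
  set C := (raws.foldl pvStepB' ([], [])).2 with hC
  obtain ⟨h1, h2, h3⟩ := hinv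
  by_cases hCne : C = []
  · rw [if_neg (fun hc => hc hCne)]
    by_cases hPne : P = []
    · rw [h2 hCne hPne, hPne]
      rfl
    · obtain ⟨heq, _⟩ := h3 hCne hPne
      rw [heq, pv_strip_append_newline]
  · obtain ⟨heq, _, _⟩ := h1 hCne
    rw [if_pos hCne, heq]
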